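-- pv_equiv track=rewrite | github.com/wajihullahbaig/timm-moe | main_with_assignment_loss.py | create_expert_assignments
-- ===== SOURCE A (Python) =====
-- from typing import Dict, Optional
--
-- def create_expert_assignments(num_classes: int, num_experts: int) -> Dict[int, list]:
--     """Create balanced label assignments for experts"""
--     assignments = {}
--     labels_per_expert = num_classes // num_experts
--     remaining = num_classes % num_experts
--
--     start_idx = 0
--     for expert_idx in range(num_experts):
--         num_labels = labels_per_expert + (1 if expert_idx < remaining else 0)
--         assignments[expert_idx] = list(range(start_idx, start_idx + num_labels))
--         start_idx += num_labels
--
--     return assignments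
-- ===== SOURCE B (Python) =====
-- def _expert(q, r, c):
--     """Owner expert of label c when the first r experts hold q+1 labels and the rest q."""
--     boundary = r * (q + 1)
--     return c // (q + 1) if c < boundary else r + (c - boundary) // q
--
-- def create_expert_assignments(num_classes: int, num_experts: int):
--     """Create balanced label assignments for experts by scattering each label
--     into its owner expert's bucket (label-driven grouping, not expert-driven ranges)."""
--     q, r = divmod(num_classes, num_experts)
--     assignments = {i: [] for i in range(num_experts)}
--     for c in range(num_classes):
--         assignments[_expert(q, r, c)].append(c)
--     return assignments
-- ===== Notes on version B (the rewrite author's own statement) =====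
-- stated objective: alternative
-- what changed: Inverted the construction: instead of building a contiguous range per expert with a running start index, B loops over the labels and scatters each label into its owner expert's bucket computed by an ownership function (label-driven grouping vs expert-driven range building).
-- outside the precondition, e.g. on create_expert_assignments(5, -2): A returns {}, B raises KeyError; on create_expert_assignments(5, 0): A raises ZeroDivisionError, B raises ZeroDivisionError
import Mathlib
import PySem

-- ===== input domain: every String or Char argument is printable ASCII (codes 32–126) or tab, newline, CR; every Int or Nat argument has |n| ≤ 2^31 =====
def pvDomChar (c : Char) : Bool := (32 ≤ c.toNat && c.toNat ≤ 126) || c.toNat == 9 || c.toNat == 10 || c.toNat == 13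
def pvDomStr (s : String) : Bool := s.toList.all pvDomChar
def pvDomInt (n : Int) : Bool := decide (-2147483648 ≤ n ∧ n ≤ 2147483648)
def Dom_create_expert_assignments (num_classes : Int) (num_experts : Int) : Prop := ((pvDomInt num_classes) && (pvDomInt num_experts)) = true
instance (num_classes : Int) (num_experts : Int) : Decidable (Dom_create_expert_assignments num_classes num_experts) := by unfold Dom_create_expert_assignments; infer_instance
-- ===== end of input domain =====

-- B inverts A's construction: instead of building a contiguous range per expert with a
-- running start index, B scatters each label into its owner expert's bucket (alternative decomposition, same cost).


-- ===== PORT A =====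
-- literal port: dict built in a loop over range(num_experts), carrying (assignments, start_idx)
def create_expert_assignments (num_classes : Int) (num_experts : Int) : List (Int × List Int) :=
  let labels_per_expert := PySem.Int.floordiv num_classes num_experts
  let remaining := PySem.Int.mod num_classes num_experts
  let st := (PySem.List.pyRange 0 num_experts 1).foldl
    (fun (s : PySem.Dict Int (List Int) × Int) expert_idx =>
      let num_labels := labels_per_expert + (if expert_idx < remaining then 1 else 0)
      (s.1.insert expert_idx (PySem.List.pyRange s.2 (s.2 + num_labels) 1), s.2 + num_labels))
    (PySem.Dict.empty, 0)
  st.1.items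

-- ===== PORT B =====
-- port of Source B's helper _expert: owner expert of label c
def cea_expert (q r c : Int) : Int :=
  let boundary := r * (q + 1)
  if c < boundary then PySem.Int.floordiv c (q + 1)
  else r + PySem.Int.floordiv (c - boundary) q

-- literal port of Source B: empty bucket per expert, then scatter each label into its owner's
-- bucket (assignments[e].append(c) = the bucket at key e becomes bucket ++ [c]: Dict.modify)
def create_expert_assignments_alt (num_classes : Int) (num_experts : Int) : List (Int × List Int) :=
  let q := PySem.Int.floordiv num_classes num_experts
  let r := PySem.Int.mod num_classes num_experts
  let assignments : PySem.Dict Int (List Int) :=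
    PySem.Dict.mk ((PySem.List.pyRange 0 num_experts 1).map (fun i => (i, ([] : List Int))))
  let d := (PySem.List.pyRange 0 num_classes 1).foldl
    (fun d c => d.modify (cea_expert q r c) [] (fun l => l ++ [c])) assignments
  d.items

-- ===== PRECONDITION & SPEC =====
-- Pre_ excludes num_experts = 0 (both A and B raise ZeroDivisionError) and the out-of-domain
-- corner num_experts < 0 with 0 < num_classes, where A's empty dict is an artefact of
-- range() on a negative count and B raises KeyError.
def Pre_create_expert_assignments (num_classes : Int) (num_experts : Int) : Prop :=
  0 < num_experts ∨ (num_experts < 0 ∧ num_classes ≤ 0)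
instance (num_classes : Int) (num_experts : Int) : Decidable (Pre_create_expert_assignments num_classes num_experts) := by unfold Pre_create_expert_assignments; infer_instance
def pvWitness_create_expert_assignments : Int × Int := (10, 3)
def Spec_create_expert_assignments (num_classes : Int) (num_experts : Int) (out : List (Int × List Int)) : Prop := out = create_expert_assignments_alt num_classes num_experts
instance (num_classes : Int) (num_experts : Int) (out : List (Int × List Int)) : Decidable (Spec_create_expert_assignments num_classes num_experts out) := by unfold Spec_create_expert_assignments; infer_instance

-- ===== CLAIM (what is proved, stated in full; the proofs are below) =====
def Claim_equal_create_expert_assignments : Prop := ∀ (num_classes : Int) (num_experts : Int), Dom_create_expert_assignments num_classes num_experts → Pre_create_expert_assignments num_classes num_experts → Spec_create_expert_assignments num_classes num_experts (create_expert_assignments num_classes num_experts)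

-- ===== LEMMAS AND PROOFS =====

-- A-side loop invariant: after processing range(0, n), the dict's items are the mapped range
-- and start_idx is the closed form n*q + min n r
theorem cea_invariant (q r : Int) (hr : 0 ≤ r) (n : Nat) :
    (PySem.List.pyRange 0 n 1).foldl
      (fun (s : PySem.Dict Int (List Int) × Int) i =>
        let m := q + (if i < r then 1 else 0)
        (s.1.insert i (PySem.List.pyRange s.2 (s.2 + m) 1), s.2 + m))
      (PySem.Dict.empty, 0)
    = (PySem.Dict.mk ((PySem.List.pyRange 0 n 1).map
        (fun i => (i, PySem.List.pyRange (i * q + min i r)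
            (i * q + min i r + (q + (if i < r then 1 else 0))) 1))),
       (n : Int) * q + min (n : Int) r) := by
  induction n with
  | zero =>
    simp [PySem.Dict.empty]
    omega
  | succ k ih =>
    have hk : (0 : Int) ≤ (k : Int) := by positivity
    have hsplit : PySem.List.pyRange 0 ((k : Int) + 1) 1
        = PySem.List.pyRange 0 (k : Int) 1 ++ [(k : Int)] :=
      PySem.List.pyRange_one_succ_right hk
    have hcast : ((k + 1 : Nat) : Int) = (k : Int) + 1 := by push_cast; ring
    rw [hcast, hsplit, List.foldl_append, ih, List.map_append]
    have hfresh : (PySem.Dict.mk ((PySem.List.pyRange 0 k 1).map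
        (fun i => (i, PySem.List.pyRange (i * q + min i r)
            (i * q + min i r + (q + (if i < r then 1 else 0))) 1)))).contains (k : Int) = false := by
      rw [PySem.Dict.contains_mk]
      simp [PySem.List.mem_pyRange_one]
      omega
    have h1 : (k : Int) * q + min (k : Int) r + (q + (if (k : Int) < r then 1 else 0))
        = ((k : Int) + 1) * q + min ((k : Int) + 1) r := by
      by_cases h : r ≤ (k : Int)
      · rw [min_eq_right h, min_eq_right (by omega), if_neg (by omega)]; ring
      · rw [min_eq_left (by omega), min_eq_left (by omega), if_pos (by omega)]; ring
    simp only [List.foldl_cons, List.foldl_nil, List.map_cons, List.map_nil]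
    apply Prod.ext
    · apply PySem.Dict.ext
      rw [PySem.Dict.items_insert_of_not_contains _ _ hfresh]
    · simpa using h1

-- ownership characterisation: cea_expert q r c = i iff c lies in expert i's contiguous block
theorem cea_expert_eq_iff (q r c i : Int) (hq : 0 ≤ q) (_hr : 0 ≤ r) (_hc : 0 ≤ c) (_hi : 0 ≤ i)
    (hq0 : q = 0 → c < r) :
    cea_expert q r c = i ↔
      i * q + min i r ≤ c ∧ c < i * q + min i r + (q + (if i < r then 1 else 0)) := by
  unfold cea_expert
  by_cases hb : c < r * (q + 1)
  · rw [if_pos hb, PySem.Int.floordiv_eq_iff_of_pos (by omega)]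
    constructor
    · rintro ⟨h1, h2⟩
      have hir : i < r := by nlinarith
      rw [min_eq_left (by omega), if_pos hir]
      constructor <;> nlinarith
    · rintro ⟨h1, h2⟩
      have hir : i < r := by
        by_contra hge
        rw [min_eq_right (by omega)] at h1 h2
        rw [if_neg hge] at h2
        nlinarith
      rw [min_eq_left (by omega)] at h1 h2
      rw [if_pos hir] at h2
      constructor <;> nlinarith
  · rw [if_neg hb]
    have hq1 : 1 ≤ q := by
      rcases lt_or_ge 0 q with h | h
      · omega
      · exfalso; have : q = 0 := by omega
        subst this; simp at hb; omega
    constructor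
    · intro he
      have h2 : PySem.Int.floordiv (c - r * (q + 1)) q = i - r := by omega
      rw [PySem.Int.floordiv_eq_iff_of_pos (by omega)] at h2
      obtain ⟨h3, h4⟩ := h2
      have hir : r ≤ i := by nlinarith
      rw [min_eq_right (by omega), if_neg (by omega)]
      constructor <;> nlinarith
    · rintro ⟨h1, h2⟩
      have hir : r ≤ i := by
        by_contra hlt
        rw [min_eq_left (by omega)] at h2
        rw [if_pos (by omega : i < r)] at h2
        nlinarith
      rw [min_eq_right (by omega)] at h1 h2
      rw [if_neg (by omega : ¬ i < r)] at h2
      have h2' : PySem.Int.floordiv (c - r * (q + 1)) q = i - r := by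
        rw [PySem.Int.floordiv_eq_iff_of_pos (by omega)]
        constructor <;> nlinarith
      omega

-- the init dict {i: [] for i in range(ne)} looks up to [] at every key
theorem cea_init_getD (l : List Int) (i : Int) :
    (PySem.Dict.mk (l.map (fun j => (j, ([] : List Int))))).getD i [] = [] := by
  induction l with
  | nil => rfl
  | cons x xs ih =>
    simp only [List.map_cons]
    rw [PySem.Dict.getD_eq_get?_getD, PySem.Dict.get?_mk_cons]
    split
    · rfl
    · rw [← PySem.Dict.getD_eq_get?_getD]; exact ih

-- labels assigned to expert i = the filter of range(num_classes) by ownership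
theorem cea_scatter_getD (q r nc : Int) (i : Int)
    (init : PySem.Dict Int (List Int)) (hinit : init.getD i [] = []) :
    ((PySem.List.pyRange 0 nc 1).foldl
      (fun d c => d.modify (cea_expert q r c) [] (fun l => l ++ [c])) init).getD i []
    = (PySem.List.pyRange 0 nc 1).filter (fun c => cea_expert q r c == i) := by
  have h := PySem.Dict.getD_foldl_modify_append
    (l := (PySem.List.pyRange 0 nc 1).map (fun c => (cea_expert q r c, c)))
    (d := init) (c := i)
  rw [List.foldl_map] at h
  rw [h, hinit, List.filter_map, List.map_map]
  simp [Function.comp_def]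

-- every owned expert index lies in range(num_experts)
theorem cea_expert_range (q r ne c : Int) (hq : 0 ≤ q) (hr : 0 ≤ r) (hrlt : r < ne)
    (hc : 0 ≤ c) (hlt : c < q * ne + r) :
    0 ≤ cea_expert q r c ∧ cea_expert q r c < ne := by
  unfold cea_expert
  by_cases hb : c < r * (q + 1)
  · rw [if_pos hb]
    have h0 : 0 ≤ PySem.Int.floordiv c (q + 1) := by
      rw [PySem.Int.le_floordiv_iff_mul_le (by omega)]; omega
    have h1 : PySem.Int.floordiv c (q + 1) < r := by
      rw [PySem.Int.floordiv_lt_iff_lt_mul (by omega)]; exact hb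
    omega
  · rw [if_neg hb]
    have hq1 : 1 ≤ q := by
      rcases lt_or_ge 0 q with h | h
      · omega
      · exfalso; have hq' : q = 0 := by omega
        subst hq'; simp at hb; nlinarith
    have h0 : 0 ≤ PySem.Int.floordiv (c - r * (q + 1)) q := by
      rw [PySem.Int.le_floordiv_iff_mul_le (by omega)]; omega
    have h1 : PySem.Int.floordiv (c - r * (q + 1)) q < ne - r := by
      rw [PySem.Int.floordiv_lt_iff_lt_mul (by omega)]; nlinarith
    omega

-- a list update that only re-adds members is the identity
theorem cea_update_self (R L : List Int) (h : ∀ c ∈ L, c ∈ R) : PySem.Set.update R L = R := by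
  rw [PySem.Set.update_eq_append_filter]
  have h2 : List.filter (fun y => !PySem.Set.contains R y) (PySem.Set.ofList L) = [] := by
    rw [List.filter_eq_nil_iff]
    intro a ha
    simp only [Bool.not_eq_true', Bool.not_eq_false, PySem.Set.contains_iff]
    exact h a ((PySem.Set.mem_ofList _ _).mp ha)
  rw [h2, List.append_nil]

-- filtering range(num_classes) by ownership of expert i yields i's contiguous block
theorem cea_filter_eq (q r ne nc i : Int) (hq : 0 ≤ q) (hr : 0 ≤ r) (_hrlt : r < ne)
    (hi : 0 ≤ i) (hin : i < ne) (hsum : q * ne + r = nc) :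
    (PySem.List.pyRange 0 nc 1).filter (fun c => cea_expert q r c == i)
    = PySem.List.pyRange (i * q + min i r)
        (i * q + min i r + (q + (if i < r then 1 else 0))) 1 := by
  have hmin : 0 ≤ min i r := le_min hi hr
  have hcnt : 0 ≤ q + (if i < r then 1 else 0) := by split_ifs <;> omega
  have hs0 : 0 ≤ i * q + min i r := by positivity
  have hec : i * q + min i r + (q + (if i < r then 1 else 0)) ≤ nc := by
    by_cases h : i < r
    · rw [if_pos h, min_eq_left (by omega)]; nlinarith
    · rw [if_neg h, min_eq_right (by omega)]; nlinarith
  have hq0 : ∀ c : Int, c < nc → q = 0 → c < r := by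
    intro c hcnc hq'; subst hq'; omega
  have h2 : PySem.List.pyRange 0 nc 1
      = PySem.List.pyRange 0 (i * q + min i r) 1 ++ PySem.List.pyRange (i * q + min i r) nc 1 :=
    PySem.List.pyRange_one_append _ _ _ hs0 (by omega)
  have h1 : PySem.List.pyRange (i * q + min i r) nc 1
      = PySem.List.pyRange (i * q + min i r)
          (i * q + min i r + (q + (if i < r then 1 else 0))) 1
        ++ PySem.List.pyRange (i * q + min i r + (q + (if i < r then 1 else 0))) nc 1 :=
    PySem.List.pyRange_one_append _ _ _ (by omega) hec
  rw [h2, h1, List.filter_append, List.filter_append]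
  have hleft : (PySem.List.pyRange 0 (i * q + min i r) 1).filter
      (fun c => cea_expert q r c == i) = [] := by
    rw [List.filter_eq_nil_iff]
    intro c hcm
    rw [PySem.List.mem_pyRange_one] at hcm
    simp only [beq_iff_eq]
    intro he
    have := (cea_expert_eq_iff q r c i hq hr (by omega) hi
      (hq0 c (by omega) ·)).mp he
    omega
  have hmid : (PySem.List.pyRange (i * q + min i r)
      (i * q + min i r + (q + (if i < r then 1 else 0))) 1).filter
      (fun c => cea_expert q r c == i)
      = PySem.List.pyRange (i * q + min i r)
          (i * q + min i r + (q + (if i < r then 1 else 0))) 1 := by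
    rw [List.filter_eq_self]
    intro c hcm
    rw [PySem.List.mem_pyRange_one] at hcm
    simp only [beq_iff_eq]
    exact (cea_expert_eq_iff q r c i hq hr (by omega) hi
      (hq0 c (by omega) ·)).mpr ⟨hcm.1, hcm.2⟩
  have hright : (PySem.List.pyRange
      (i * q + min i r + (q + (if i < r then 1 else 0))) nc 1).filter
      (fun c => cea_expert q r c == i) = [] := by
    rw [List.filter_eq_nil_iff]
    intro c hcm
    rw [PySem.List.mem_pyRange_one] at hcm
    simp only [beq_iff_eq]
    intro he
    have := (cea_expert_eq_iff q r c i hq hr (by omega) hi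
      (hq0 c (by omega) ·)).mp he
    omega
  rw [hleft, hmid, hright, List.nil_append, List.append_nil]

-- ===== VERDICT (by name: the statement is the Claim_ definition above) =====
theorem create_expert_assignments_spec : Claim_equal_create_expert_assignments := by
  intro nc ne _ hpre
  unfold Spec_create_expert_assignments
  simp only [create_expert_assignments, create_expert_assignments_alt]
  rcases hpre with hpos | ⟨hneg, hnc⟩
  · obtain ⟨n, rfl⟩ : ∃ n : Nat, ne = (n : Int) :=
      ⟨ne.toNat, (Int.toNat_of_nonneg (by omega)).symm⟩
    have hr : 0 ≤ PySem.Int.mod nc n := PySem.Int.mod_nonneg nc hpos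
    have hrlt : PySem.Int.mod nc n < n := PySem.Int.mod_lt nc hpos
    have hsum : PySem.Int.floordiv nc n * n + PySem.Int.mod nc n = nc :=
      PySem.Int.floordiv_mul_add_mod nc n
    rw [cea_invariant (PySem.Int.floordiv nc n) (PySem.Int.mod nc n) hr n]
    by_cases hncpos : 0 < nc
    · -- positive label count: B's final dict has keys range(n) and bucket i = filter = block i
      have hq : 0 ≤ PySem.Int.floordiv nc n := by
        rw [PySem.Int.le_floordiv_iff_mul_le hpos]; omega
      have hEmem : ∀ c ∈ PySem.List.pyRange 0 nc 1,
          cea_expert (PySem.Int.floordiv nc n) (PySem.Int.mod nc n) c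
            ∈ PySem.List.pyRange 0 (n : Int) 1 := by
        intro c hc
        rw [PySem.List.mem_pyRange_one] at hc ⊢
        exact cea_expert_range _ _ _ _ hq hr hrlt hc.1 (by omega)
      have hkeys0 : (PySem.Dict.mk ((PySem.List.pyRange 0 (n : Int) 1).map
          (fun i => (i, ([] : List Int))))).keys = PySem.List.pyRange 0 (n : Int) 1 := by
        rw [PySem.Dict.keys_mk, List.map_map]; simp [Function.comp_def]
      have hkeys : ((PySem.List.pyRange 0 nc 1).foldl
          (fun d c => d.modify (cea_expert (PySem.Int.floordiv nc n) (PySem.Int.mod nc n) c)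
            [] (fun l => l ++ [c]))
          (PySem.Dict.mk ((PySem.List.pyRange 0 (n : Int) 1).map
            (fun i => (i, ([] : List Int)))))).keys = PySem.List.pyRange 0 (n : Int) 1 := by
        rw [PySem.Dict.keys_foldl_modify_key _
          (cea_expert (PySem.Int.floordiv nc n) (PySem.Int.mod nc n)) []
          (fun _ c => fun l => l ++ [c]), hkeys0]
        apply cea_update_self
        intro c hc
        rw [List.mem_map] at hc
        obtain ⟨c', hc', rfl⟩ := hc
        exact hEmem c' hc'
      have hnodup : ((PySem.List.pyRange 0 nc 1).foldl
          (fun d c => d.modify (cea_expert (PySem.Int.floordiv nc n) (PySem.Int.mod nc n) c)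
            [] (fun l => l ++ [c]))
          (PySem.Dict.mk ((PySem.List.pyRange 0 (n : Int) 1).map
            (fun i => (i, ([] : List Int)))))).keys.Nodup := by
        rw [hkeys]; exact PySem.List.nodup_pyRange_one _ _
      rw [PySem.Dict.items_eq_map_keys _ hnodup [], hkeys]
      apply List.map_congr_left
      intro i hi
      rw [PySem.List.mem_pyRange_one] at hi
      rw [cea_scatter_getD _ _ _ _ _ (cea_init_getD _ i),
          cea_filter_eq (PySem.Int.floordiv nc n) (PySem.Int.mod nc n) n nc i
            hq hr hrlt hi.1 hi.2 hsum]
    · -- nc ≤ 0: no labels; every block of A is empty and B keeps the empty buckets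
      rw [PySem.List.pyRange_one_eq_nil (by omega : nc ≤ 0), List.foldl_nil]
      have hqle : PySem.Int.floordiv nc n ≤ 0 := by
        have : PySem.Int.floordiv nc n < 1 := by
          rw [PySem.Int.floordiv_lt_iff_lt_mul hpos]; omega
        omega
      apply congrArg PySem.Dict.items
      apply PySem.Dict.ext
      apply List.map_congr_left
      intro i hi
      rw [PySem.List.mem_pyRange_one] at hi
      have hcnt : PySem.Int.floordiv nc n + (if i < PySem.Int.mod nc n then 1 else 0) ≤ 0 := by
        by_cases h : i < PySem.Int.mod nc n
        · rw [if_pos h]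
          have hq1 : PySem.Int.floordiv nc n ≤ -1 := by nlinarith
          omega
        · rw [if_neg h]; omega
      rw [PySem.List.pyRange_one_eq_nil (by omega)]
  · -- negative expert count, no labels: both sides are the empty dict's items
    rw [PySem.List.pyRange_one_eq_nil (le_of_lt hneg),
        PySem.List.pyRange_one_eq_nil hnc]
    simp [PySem.Dict.empty]
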